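-- pv_equiv track=rewrite | github.com/WantKakao/problemSolving | 백준/Gold/9466. 텀 프로젝트/텀 프로젝트.py | find_teams
-- ===== SOURCE A (Python) =====
-- def find_teams(n, selections):
--     visited = [False] * (n + 1)
--     team = [False] * (n + 1)
--     result = 0
--
--     def dfs(v):
--         stack = []
--         current = v
--         while not visited[current]:
--             visited[current] = True
--             stack.append(current)
--             current = selections[current]
--
--         # 사이클이 존재하면
--         if current in stack:
--             cycle_start = stack.index(current)
--             for i in range(cycle_start, len(stack)):
--                 team[stack[i]] = True
--
--     for i in range(1, n + 1):
--         if not visited[i]: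
--             dfs(i)
--
--     for i in range(1, n + 1):
--         if not team[i]:
--             result += 1
--
--     return result
-- ===== SOURCE B (Python) =====
-- def find_teams(n, selections):
--     # Count students whose selection chain never returns to themselves:
--     # v is on a cycle iff following selections from v comes back to v within n steps.
--     result = 0
--     for v in range(1, n + 1):
--         cur = v
--         on_cycle = False
--         for _ in range(n):
--             cur = selections[cur]
--             if cur == v:
--                 on_cycle = True
--                 break
--         if not on_cycle:
--             result += 1
--     return result
-- ===== Notes on version B (the rewrite author's own statement) =====
-- stated objective: simpler
-- what changed: A runs a stack-based DFS with visited/team arrays, marks cycle segments via stack.index, and counts unmarked nodes in a second pass; B drops all arrays and for each student simply follows the selection chain up to n steps to test whether it returns to the start, counting those that never return.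
-- outside the precondition, e.g. on find_teams(2, [5, 1, -1, -3, 2, -1, 2]): A returns 1, B returns 0; on find_teams(3, [-3, -1, 2]): A returns 2, B raises IndexError
import Mathlib
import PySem

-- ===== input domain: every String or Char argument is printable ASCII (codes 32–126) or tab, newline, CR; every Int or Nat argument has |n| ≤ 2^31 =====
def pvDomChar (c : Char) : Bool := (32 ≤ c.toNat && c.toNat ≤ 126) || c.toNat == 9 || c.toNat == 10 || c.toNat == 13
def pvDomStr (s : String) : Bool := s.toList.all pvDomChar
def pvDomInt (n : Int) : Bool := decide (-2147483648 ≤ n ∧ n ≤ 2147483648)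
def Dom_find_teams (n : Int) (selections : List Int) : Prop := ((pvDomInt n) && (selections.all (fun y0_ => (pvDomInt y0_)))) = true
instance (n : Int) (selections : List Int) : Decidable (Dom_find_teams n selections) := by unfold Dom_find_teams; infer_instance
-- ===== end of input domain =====

-- B replaces A's DFS + visited/team arrays by a per-student chain walk of at most n steps
-- testing whether the chain returns to its start; simpler (no arrays, no helper), not faster.
-- A mutates no argument; equivalence is about the return value.

-- ===== PORT A =====
-- the 'while not visited[current]' loop of dfs; fuel = visited.length bounds the number of
-- iterations (each pass flips a False entry of visited to True), so the port is exact
def pvDfsWalk (selections : List Int) : Nat → List Bool → List Int → Int → List Bool × List Int × Int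
  | 0, visited, stack, current => (visited, stack, current)
  | fuel + 1, visited, stack, current =>
    if PySem.List.pyGet? visited current = some false then
      pvDfsWalk selections fuel (PySem.List.pySetD visited current true)
        (stack ++ [current]) (PySem.List.pyGetD selections current 0)
    else (visited, stack, current)

-- dfs(v): walk, then 'if current in stack: for i in range(stack.index(current), len(stack)): team[stack[i]] = True'
def pvDfs (selections : List Int) (visited team : List Bool) (v : Int) : List Bool × List Bool :=
  let r := pvDfsWalk selections visited.length visited [] v
  match PySem.List.index? r.2.1 r.2.2 with
  | some k => (r.1, (r.2.1.drop k).foldl (fun t x => PySem.List.pySetD t x true) team)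
  | none => (r.1, team)

def find_teams (n : Int) (selections : List Int) : Int :=
  let visited0 : List Bool := List.replicate (n + 1).toNat false
  let team0 : List Bool := List.replicate (n + 1).toNat false
  let st := (PySem.List.pyRange 1 (n + 1) 1).foldl
    (fun (st : List Bool × List Bool) i =>
      if PySem.List.pyGetD st.1 i false = false then pvDfs selections st.1 st.2 i else st)
    (visited0, team0)
  (PySem.List.pyRange 1 (n + 1) 1).foldl
    (fun r i => if PySem.List.pyGetD st.2 i false = false then r + 1 else r) 0

-- ===== PORT B =====
-- inner 'for _ in range(n)' loop of Source B: follow selections from cur, true iff v is reached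
def pvChase (selections : List Int) (v : Int) : Int → Nat → Bool
  | _, 0 => false
  | cur, fuel + 1 =>
    let cur' := PySem.List.pyGetD selections cur 0
    if cur' = v then true else pvChase selections v cur' fuel

def find_teams_alt (n : Int) (selections : List Int) : Int :=
  (PySem.List.pyRange 1 (n + 1) 1).foldl
    (fun r v => if pvChase selections v v n.toNat then r else r + 1) 0

-- ===== PRECONDITION & SPEC =====
-- Pre_ is the problem's natural domain: selections is a 1-indexed table with choices 1..n at
-- indices 1..n (index 0 is a dummy, entries past index n are never read); n ≤ 0 means no
-- students. It excludes inputs on which A still returns a value only via Python negative-index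
-- wraparound or a too-short list, where A's result is an accident of its indexing; B may raise
-- or differ there.
def Pre_find_teams (n : Int) (selections : List Int) : Prop :=
  n ≤ 0 ∨ (n.toNat + 1 ≤ selections.length ∧
    ∀ x ∈ (selections.take (n.toNat + 1)).drop 1, 1 ≤ x ∧ x ≤ n)
instance (n : Int) (selections : List Int) : Decidable (Pre_find_teams n selections) := by
  unfold Pre_find_teams; infer_instance

def pvWitness_find_teams : Int × List Int := (3, [0, 2, 3, 1])

def Spec_find_teams (n : Int) (selections : List Int) (out : Int) : Prop := out = find_teams_alt n selections
instance (n : Int) (selections : List Int) (out : Int) : Decidable (Spec_find_teams n selections out) := by unfold Spec_find_teams; infer_instance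

-- ===== CLAIM (what is proved, stated in full; the proofs are below) =====
def Claim_equal_find_teams : Prop := ∀ (n : Int) (selections : List Int), Dom_find_teams n selections → Pre_find_teams n selections → Spec_find_teams n selections (find_teams n selections)

-- ===== LEMMAS AND PROOFS =====

def pvF (sel : List Int) (x : Int) : Int := PySem.List.pyGetD sel x 0

def pvChain (sel : List Int) : List Int → Int → Prop
  | [], _ => True
  | x :: xs, c => pvF sel x = xs.headD c ∧ pvChain sel xs c

def pvCyc (sel : List Int) (b : Nat) (v : Int) : Prop :=
  ∃ k, 1 ≤ k ∧ k ≤ b ∧ (pvF sel)^[k] v = v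

def pvAcyc (sel : List Int) (v : Int) : Prop :=
  ∀ k, 1 ≤ k → (pvF sel)^[k] v ≠ v

def pvInv (n : Int) (sel : List Int) (visited team : List Bool) : Prop :=
  visited.length = n.toNat + 1 ∧ team.length = n.toNat + 1 ∧
  (∀ v : Int, 1 ≤ v → v ≤ n → PySem.List.pyGetD visited v false = true →
    PySem.List.pyGetD visited (pvF sel v) false = true) ∧
  (∀ v : Int, 1 ≤ v → v ≤ n → PySem.List.pyGetD team v false = true →
    PySem.List.pyGetD visited v false = true ∧ pvCyc sel n.toNat v) ∧
  (∀ v : Int, 1 ≤ v → v ≤ n → PySem.List.pyGetD visited v false = true →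
    PySem.List.pyGetD team v false = false → pvAcyc sel v)

lemma pv_getD_eq {α : Type} (l : List α) (i : Int) (hi : 0 ≤ i) (d : α) :
    PySem.List.pyGetD l i d = l.getD i.toNat d := by
  have h : i = ((i.toNat : Nat) : Int) := (Int.toNat_of_nonneg hi).symm
  rw [h, PySem.List.pyGetD_natCast]
  congr 1

lemma pv_setD_getD {α : Type} (l : List α) (i j : Int) (v d : α) (hi : 0 ≤ i) (hj : 0 ≤ j)
    (hilen : i.toNat < l.length) :
    PySem.List.pyGetD (PySem.List.pySetD l i v) j d = if j = i then v else PySem.List.pyGetD l j d := by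
  rw [PySem.List.pySetD_of_nonneg _ _ hi, pv_getD_eq _ _ hj, pv_getD_eq _ _ hj]
  simp only [List.getD_eq_getElem?_getD, List.getElem?_set]
  have hij : j = i ↔ j.toNat = i.toNat := by omega
  split_ifs with h1 h2 h3 <;> simp_all

lemma pv_getD_false_of_all {l : List Bool} (h : ∀ x ∈ l, x = false) (i : Int) :
    PySem.List.pyGetD l i false = false := by
  rcases h' : PySem.List.pyGet? l i with _ | b
  · simp [PySem.List.pyGetD, h']
  · have := PySem.List.mem_of_pyGet?_eq_some (x := b) (xs := l) (i := i) h'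
    have hb := h _ this
    simp [PySem.List.pyGetD, h', hb]

lemma pv_f_inR (n : Int) (sel : List Int) (hlen : n.toNat + 1 ≤ sel.length)
    (hsel : ∀ x ∈ (sel.take (n.toNat + 1)).drop 1, 1 ≤ x ∧ x ≤ n) (v : Int) (h1 : 1 ≤ v) (h2 : v ≤ n) :
    1 ≤ pvF sel v ∧ pvF sel v ≤ n := by
  have hv : v.toNat < sel.length := by omega
  have hpf : pvF sel v = sel[v.toNat] := by
    unfold pvF
    exact PySem.List.pyGetD_eq_getElem sel 0 (by omega) (by omega)
  rw [hpf]
  apply hsel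
  have h1' : 1 ≤ v.toNat := by omega
  have hdl : ((sel.take (n.toNat + 1)).drop 1).length = n.toNat := by
    simp; omega
  have : sel[v.toNat] = ((sel.take (n.toNat + 1)).drop 1)[v.toNat - 1]'(by omega) := by
    rw [List.getElem_drop, List.getElem_take]
    congr 1; omega
  rw [this]; exact List.getElem_mem _

lemma pvChain_append (sel : List Int) (l : List Int) (c : Int) (h : pvChain sel l c) :
    pvChain sel (l ++ [c]) (pvF sel c) := by
  induction l with
  | nil => simp [pvChain]
  | cons x xs ih =>
    obtain ⟨h1, h2⟩ := h
    refine ⟨?_, ih h2⟩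
    cases xs <;> simp_all

lemma pvChain_suffix (sel : List Int) (a b : List Int) (c : Int) (h : pvChain sel (a ++ b) c) :
    pvChain sel b c := by
  induction a with
  | nil => exact h
  | cons x xs ih => exact ih h.2

lemma pvChain_prefix (sel : List Int) (a b : List Int) (c : Int) (h : pvChain sel (a ++ b) c) :
    pvChain sel a (b.headD c) := by
  induction a with
  | nil => trivial
  | cons x xs ih =>
    obtain ⟨h1, h2⟩ := h
    refine ⟨?_, ih h2⟩
    cases xs <;> cases b <;> simp_all [pvChain]

lemma pvChain_f_mem (sel : List Int) (l : List Int) (c : Int) (h : pvChain sel l c)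
    (x : Int) (hx : x ∈ l) : pvF sel x ∈ l ∨ pvF sel x = c := by
  induction l with
  | nil => simp at hx
  | cons y ys ih =>
    obtain ⟨h1, h2⟩ := h
    rcases List.mem_cons.1 hx with rfl | hmem
    · cases ys with
      | nil => right; simpa using h1
      | cons z zs => left; simp [h1]
    · rcases ih h2 hmem with h' | h'
      · left; exact List.mem_cons_of_mem _ h'
      · right; exact h'

lemma pvChain_iter_from (sel : List Int) (l : List Int) (c : Int) (h : pvChain sel l c) :
    ∀ j (hj : j < l.length), (pvF sel)^[l.length - j] (l[j]) = c := by
  induction l with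
  | nil => intro j hj; simp at hj
  | cons x xs ih =>
    intro j hj
    obtain ⟨h1, h2⟩ := h
    cases j with
    | zero =>
      simp only [List.length_cons, Nat.sub_zero, List.getElem_cons_zero]
      rw [Function.iterate_succ_apply]
      cases xs with
      | nil => simpa using h1
      | cons z zs =>
        have := ih h2 0 (by simp)
        simp_all
    | succ j =>
      have := ih h2 j (by simpa using hj)
      simpa using this

lemma pvChain_iter_to (sel : List Int) (l : List Int) (c : Int) (h : pvChain sel l c) :
    ∀ j (hj : j < l.length) (h0 : 0 < l.length), (pvF sel)^[j] (l[0]) = l[j] := by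
  induction l with
  | nil => intro j hj; simp at hj
  | cons x xs ih =>
    intro j hj h0
    obtain ⟨h1, h2⟩ := h
    cases j with
    | zero => simp
    | succ j =>
      cases xs with
      | nil => simp at hj
      | cons z zs =>
        have := ih h2 j (by simpa using hj) (by simp)
        rw [Function.iterate_succ_apply]
        simp_all

lemma pv_len_le (n : Int) (l : List Int) (hnd : l.Nodup) (hl : ∀ x ∈ l, 1 ≤ x ∧ x ≤ n) :
    l.length ≤ n.toNat := by
  have hsub : l.toFinset ⊆ Finset.Icc 1 n := by
    intro x hx
    simp only [List.mem_toFinset] at hx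
    simpa [Finset.mem_Icc] using hl x hx
  have := Finset.card_le_card hsub
  rw [List.toFinset_card_of_nodup hnd] at this
  rw [Int.card_Icc] at this
  omega

lemma pv_iter_S (sel : List Int) (S : Int → Prop) (hS : ∀ y, S y → S (pvF sel y)) (x : Int)
    (hx : S (pvF sel x)) : ∀ k, 1 ≤ k → S ((pvF sel)^[k] x) := by
  intro k hk
  induction k with
  | zero => omega
  | succ k ih =>
    cases Nat.eq_or_lt_of_le hk with
    | inl h => simpa [← h] using hx
    | inr h =>
      rw [Function.iterate_succ_apply']
      exact hS _ (ih (by omega))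

lemma pv_no_cycle (sel : List Int) (l : List Int) (c : Int) (Closed : Int → Prop)
    (hch : pvChain sel l c) (hnd : l.Nodup)
    (hcl : ∀ y, Closed y → Closed (pvF sel y)) (hc : Closed c)
    (hdis : ∀ y ∈ l, ¬ Closed y) :
    ∀ x ∈ l, pvAcyc sel x := by
  intro x hx k hk heq
  obtain ⟨pre, suf, rfl⟩ := List.append_of_mem hx
  have hnd' := hnd
  rw [List.nodup_append] at hnd'
  have hxsuf : x ∉ suf := by
    have := hnd'.2.1
    simp only [List.nodup_cons] at this
    exact this.1
  have hchs : pvChain sel (x :: suf) c := pvChain_suffix sel pre _ c hch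
  set S : Int → Prop := fun y => y ∈ suf ∨ Closed y with hSdef
  have hScl : ∀ y, S y → S (pvF sel y) := by
    intro y hy
    rcases hy with hy | hy
    · rcases pvChain_f_mem sel suf c hchs.2 y hy with h' | h'
      · exact Or.inl h'
      · exact Or.inr (h' ▸ hc)
    · exact Or.inr (hcl y hy)
  have hSx : S (pvF sel x) := by
    have h1 := hchs.1
    cases suf with
    | nil => exact Or.inr (by simpa using h1 ▸ hc)
    | cons z zs => left; simp [h1]
  have hSk := pv_iter_S sel S hScl x hSx k hk
  rw [heq] at hSk
  rcases hSk with h' | h'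
  · exact hxsuf h'
  · exact hdis x hx h'

lemma pv_mark_getD (n : Int) (t : List Bool) (l : List Int) (ht : t.length = n.toNat + 1)
    (hl : ∀ x ∈ l, 1 ≤ x ∧ x ≤ n) :
    (l.foldl (fun t x => PySem.List.pySetD t x true) t).length = t.length ∧
    ∀ v : Int, 1 ≤ v → v ≤ n →
      PySem.List.pyGetD (l.foldl (fun t x => PySem.List.pySetD t x true) t) v false =
        (PySem.List.pyGetD t v false || decide (v ∈ l)) := by
  induction l generalizing t with
  | nil => simp
  | cons x xs ih =>
    have hx := hl x (by simp)
    have ht' : (PySem.List.pySetD t x true).length = t.length := by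
      rw [PySem.List.pySetD_of_nonneg _ _ (by omega)]; simp
    obtain ⟨ih1, ih2⟩ := ih (PySem.List.pySetD t x true) (by omega)
      (fun y hy => hl y (by simp [hy]))
    constructor
    · simp [ih1, ht']
    · intro v h1 h2
      rw [List.foldl_cons, ih2 v h1 h2, pv_setD_getD _ _ _ _ _ (by omega) (by omega) (by omega)]
      by_cases hvx : v = x <;> simp [hvx]

lemma pv_chase_iff (sel : List Int) (v : Int) :
    ∀ (fuel : Nat) (cur : Int),
      pvChase sel v cur fuel = true ↔ ∃ k, 1 ≤ k ∧ k ≤ fuel ∧ (pvF sel)^[k] cur = v := by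
  intro fuel
  induction fuel with
  | zero =>
    intro cur
    constructor
    · intro hh; exact absurd hh (by simp [pvChase])
    · rintro ⟨k, h1, h2, _⟩; omega
  | succ fuel ih =>
    intro cur
    by_cases h : PySem.List.pyGetD sel cur 0 = v
    · constructor
      · intro _; exact ⟨1, by omega, by omega, by simpa [pvF] using h⟩
      · intro _; rw [pvChase]; simp [h]
    · have hstep : pvChase sel v cur (fuel + 1) = pvChase sel v (PySem.List.pyGetD sel cur 0) fuel := by
        rw [pvChase]; simp [h]
      rw [hstep, ih]
      constructor
      · rintro ⟨k, hk1, hk2, hk3⟩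
        exact ⟨k + 1, by omega, by omega, by rwa [Function.iterate_succ_apply]⟩
      · rintro ⟨k, hk1, hk2, hk3⟩
        have hk1' : k ≠ 1 := by
          rintro rfl
          exact h (by simpa [pvF] using hk3)
        refine ⟨k - 1, by omega, by omega, ?_⟩
        have : k = (k - 1) + 1 := by omega
        rw [this, Function.iterate_succ_apply] at hk3
        exact hk3

lemma pv_fold_congr (tm : List Bool) (sel : List Int) (nn : Nat) (l : List Int)
    (h : ∀ i ∈ l, (PySem.List.pyGetD tm i false = false ↔ pvChase sel i i nn = false)) :
    ∀ r : Int,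
      l.foldl (fun r i => if PySem.List.pyGetD tm i false = false then r + 1 else r) r =
      l.foldl (fun r v => if pvChase sel v v nn then r else r + 1) r := by
  induction l with
  | nil => intro r; rfl
  | cons x xs ih =>
    intro r
    have hx := h x (by simp)
    simp only [List.foldl_cons]
    have : (if PySem.List.pyGetD tm x false = false then r + 1 else r) =
        (if pvChase sel x x nn then r else r + 1) := by
      cases hcb : pvChase sel x x nn <;> simp_all
    rw [this]
    exact ih (fun i hi => h i (by simp [hi])) _

lemma pv_countP_set (l : List Bool) : ∀ (k : Nat), k < l.length → l[k]! = false →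
    (l.set k true).countP (fun b => !b) < l.countP (fun b => !b) := by
  induction l with
  | nil => intro k hk; simp at hk
  | cons x xs ih =>
    intro k hk hval
    cases k with
    | zero =>
      simp only [List.getElem!_cons_zero] at hval
      subst hval
      simp
    | succ k =>
      have := ih k (by simpa using hk) (by simpa using hval)
      simp only [List.set_cons_succ, List.countP_cons]
      omega

lemma pv_walk_spec (n : Int) (sel : List Int) (hn : 0 ≤ n)
    (hlen : n.toNat + 1 ≤ sel.length) (hsel : ∀ x ∈ (sel.take (n.toNat + 1)).drop 1, 1 ≤ x ∧ x ≤ n)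
    (visited0 : List Bool) :
    ∀ (fuel : Nat) (visited : List Bool) (stack : List Int) (current : Int),
      visited.length = n.toNat + 1 →
      visited.countP (fun b => !b) ≤ fuel →
      1 ≤ current → current ≤ n →
      (∀ v : Int, 1 ≤ v → v ≤ n →
        PySem.List.pyGetD visited v false =
          (PySem.List.pyGetD visited0 v false || decide (v ∈ stack))) →
      pvChain sel stack current →
      stack.Nodup →
      (∀ x ∈ stack, (1 ≤ x ∧ x ≤ n) ∧ PySem.List.pyGetD visited0 x false = false) →
      (fun r : List Bool × List Int × Int =>
        r.1.length = n.toNat + 1 ∧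
        (∃ tl, r.2.1 = stack ++ tl) ∧
        (∀ v : Int, 1 ≤ v → v ≤ n →
          PySem.List.pyGetD r.1 v false =
            (PySem.List.pyGetD visited0 v false || decide (v ∈ r.2.1))) ∧
        pvChain sel r.2.1 r.2.2 ∧ r.2.1.Nodup ∧
        (∀ x ∈ r.2.1, (1 ≤ x ∧ x ≤ n) ∧ PySem.List.pyGetD visited0 x false = false) ∧
        (1 ≤ r.2.2 ∧ r.2.2 ≤ n) ∧
        (PySem.List.pyGetD visited0 r.2.2 false = true ∨ r.2.2 ∈ r.2.1))
        (pvDfsWalk sel fuel visited stack current) := by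
  intro fuel
  induction fuel with
  | zero =>
    intro visited stack current hvlen hcount h1 h2 hdec hch hnd hst
    have hall : visited.countP (fun b => !b) = 0 := by omega
    have hget : PySem.List.pyGet? visited current = some (visited[current.toNat]!) := by
      rw [PySem.List.pyGet?_of_nonneg _ (by omega)]
      rw [List.getElem?_eq_getElem (by omega)]
      simp [List.getElem!_eq_getElem?_getD, List.getElem?_eq_getElem (show current.toNat < visited.length by omega)]
    have htrue : visited[current.toNat]! = true := by
      have hmem : visited[current.toNat]! ∈ visited := by
        have : current.toNat < visited.length := by omega
        simp only [List.getElem!_eq_getElem?_getD, List.getElem?_eq_getElem this, Option.getD_some]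
        exact List.getElem_mem _
      have := List.countP_eq_zero.1 hall _ hmem
      simpa using this
    have hgd : PySem.List.pyGetD visited current false = true := by
      simp [PySem.List.pyGetD, hget, htrue]
    rw [hdec current h1 h2] at hgd
    simp only [pvDfsWalk]
    refine ⟨hvlen, ⟨[], by simp⟩, hdec, hch, hnd, hst, ⟨h1, h2⟩, ?_⟩
    rcases Bool.or_eq_true_iff.1 hgd with h' | h'
    · exact Or.inl h'
    · exact Or.inr (by simpa using h')
  | succ fuel ih =>
    intro visited stack current hvlen hcount h1 h2 hdec hch hnd hst
    by_cases hcond : PySem.List.pyGet? visited current = some false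
    · have hgd : PySem.List.pyGetD visited current false = false := by
        simp [PySem.List.pyGetD, hcond]
      have hor : (PySem.List.pyGetD visited0 current false || decide (current ∈ stack)) = false := by
        rw [← hdec current h1 h2]; exact hgd
      rcases Bool.or_eq_false_iff.1 hor with ⟨hv0c, hcsb⟩
      have hcs : current ∉ stack := by simpa using hcsb
      have hclt : current.toNat < visited.length := by omega
      have hvalfalse : visited[current.toNat]! = false := by
        rw [PySem.List.pyGet?_of_nonneg _ (by omega)] at hcond
        rw [List.getElem?_eq_getElem hclt] at hcond
        simp only [Option.some.injEq] at hcond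
        simp [List.getElem!_eq_getElem?_getD, List.getElem?_eq_getElem hclt, hcond]
      have hcount' : (PySem.List.pySetD visited current true).countP (fun b => !b) ≤ fuel := by
        have := pv_countP_set visited current.toNat hclt hvalfalse
        rw [PySem.List.pySetD_of_nonneg _ _ (by omega)]
        omega
      have hfin := pv_f_inR n sel hlen hsel current h1 h2
      have hres := ih (PySem.List.pySetD visited current true) (stack ++ [current])
        (PySem.List.pyGetD sel current 0)
        (by rw [PySem.List.pySetD_of_nonneg _ _ (by omega)]; simpa using hvlen)
        hcount' hfin.1 hfin.2
        (by
          intro v hv1 hv2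
          rw [pv_setD_getD _ _ _ _ _ (by omega) (by omega) (by omega), hdec v hv1 hv2]
          by_cases hvc : v = current
          · subst hvc; simp [hv0c]
          · simp [hvc, List.mem_append])
        (pvChain_append sel stack current hch)
        (hnd.append (List.nodup_singleton _) (by simpa [List.disjoint_singleton] using hcs))
        (by
          intro x hx
          rcases List.mem_append.1 hx with hx' | hx'
          · exact hst x hx'
          · simp only [List.mem_singleton] at hx'
            subst hx'
            exact ⟨⟨h1, h2⟩, hv0c⟩)
      rw [pvDfsWalk, if_pos hcond]
      obtain ⟨c1, ⟨tl, htl⟩, c3, c4, c5, c6, c7, c8⟩ := hres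
      exact ⟨c1, ⟨current :: tl, by simpa using htl⟩, c3, c4, c5, c6, c7, c8⟩
    · have hget : PySem.List.pyGet? visited current = some (visited[current.toNat]!) := by
        rw [PySem.List.pyGet?_of_nonneg _ (by omega)]
        rw [List.getElem?_eq_getElem (show current.toNat < visited.length by omega)]
        simp [List.getElem!_eq_getElem?_getD, List.getElem?_eq_getElem (show current.toNat < visited.length by omega)]
      have htrue : visited[current.toNat]! = true := by
        cases h' : visited[current.toNat]! with
        | false => rw [h'] at hget; exact absurd hget hcond
        | true => rfl
      have hgd : PySem.List.pyGetD visited current false = true := by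
        simp [PySem.List.pyGetD, hget, htrue]
      rw [hdec current h1 h2] at hgd
      rw [pvDfsWalk, if_neg hcond]
      refine ⟨hvlen, ⟨[], by simp⟩, hdec, hch, hnd, hst, ⟨h1, h2⟩, ?_⟩
      rcases Bool.or_eq_true_iff.1 hgd with h' | h'
      · exact Or.inl h'
      · exact Or.inr (by simpa using h')

lemma pv_dfs_spec (n : Int) (sel : List Int) (hn : 0 ≤ n)
    (hlen : n.toNat + 1 ≤ sel.length) (hsel : ∀ x ∈ (sel.take (n.toNat + 1)).drop 1, 1 ≤ x ∧ x ≤ n)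
    (visited team : List Bool) (v : Int)
    (hInv : pvInv n sel visited team) (h1 : 1 ≤ v) (h2 : v ≤ n)
    (hfresh : PySem.List.pyGetD visited v false = false) :
    pvInv n sel (pvDfs sel visited team v).1 (pvDfs sel visited team v).2 ∧
    PySem.List.pyGetD (pvDfs sel visited team v).1 v false = true ∧
    (∀ x : Int, 1 ≤ x → x ≤ n → PySem.List.pyGetD visited x false = true →
      PySem.List.pyGetD (pvDfs sel visited team v).1 x false = true) := by
  obtain ⟨hvl, htl, hclo, hta, htb⟩ := hInv
  have hvlt : v.toNat < visited.length := by omega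
  -- first loop iteration: v is pushed
  have hcondv : PySem.List.pyGet? visited v = some false := by
    rw [PySem.List.pyGet?_of_nonneg _ (by omega), List.getElem?_eq_getElem hvlt]
    have := pv_getD_eq visited v (by omega) false
    rw [hfresh.symm.trans this]
    simp [List.getD_eq_getElem?_getD, List.getElem?_eq_getElem hvlt]
  have hstep : pvDfsWalk sel visited.length visited [] v =
      pvDfsWalk sel n.toNat (PySem.List.pySetD visited v true) [v] (PySem.List.pyGetD sel v 0) := by
    rw [hvl, pvDfsWalk, if_pos hcondv]
    simp
  have hfv := pv_f_inR n sel hlen hsel v h1 h2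
  have hvalfalse : visited[v.toNat]! = false := by
    rw [PySem.List.pyGet?_of_nonneg _ (by omega), List.getElem?_eq_getElem hvlt] at hcondv
    simp only [Option.some.injEq] at hcondv
    simp [List.getElem!_eq_getElem?_getD, List.getElem?_eq_getElem hvlt, hcondv]
  have hw := pv_walk_spec n sel hn hlen hsel visited n.toNat
    (PySem.List.pySetD visited v true) [v] (PySem.List.pyGetD sel v 0)
    (by rw [PySem.List.pySetD_of_nonneg _ _ (by omega)]; simpa using hvl)
    (by
      have h' := pv_countP_set visited v.toNat hvlt hvalfalse
      have h'' : visited.countP (fun b => !b) ≤ visited.length := List.countP_le_length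
      rw [PySem.List.pySetD_of_nonneg _ _ (by omega)]
      omega)
    hfv.1 hfv.2
    (by
      intro u hu1 hu2
      rw [pv_setD_getD _ _ _ _ _ (by omega) (by omega) (by omega)]
      by_cases huv : u = v
      · subst huv; simp [hfresh]
      · simp [huv])
    (by simp [pvChain, pvF])
    (List.nodup_singleton _)
    (by intro x hx; simp only [List.mem_singleton] at hx; subst hx; exact ⟨⟨h1, h2⟩, hfresh⟩)
  generalize hr : pvDfsWalk sel n.toNat (PySem.List.pySetD visited v true) [v]
    (PySem.List.pyGetD sel v 0) = r at hw
  rw [hr] at hstep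
  obtain ⟨hrlen, ⟨tl, htl'⟩, hrdec, hrch, hrnd, hrst, ⟨hc1, hc2⟩, hcd⟩ := hw
  have hvmem : v ∈ r.2.1 := by rw [htl']; simp
  have hmono : ∀ x : Int, 1 ≤ x → x ≤ n → PySem.List.pyGetD visited x false = true →
      PySem.List.pyGetD r.1 x false = true := by
    intro x hx1 hx2 hx
    rw [hrdec x hx1 hx2, hx]; simp
  have hvis' : ∀ x ∈ r.2.1, (1 ≤ x ∧ x ≤ n) → PySem.List.pyGetD r.1 x false = true := by
    intro x hx hxr
    rw [hrdec x hxr.1 hxr.2]; simp [hx]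
  have hstR : ∀ x ∈ r.2.1, (1 ≤ x ∧ x ≤ n) ∧ PySem.List.pyGetD visited x false = false := hrst
  have hclo' : ∀ x : Int, 1 ≤ x → x ≤ n → PySem.List.pyGetD r.1 x false = true →
      PySem.List.pyGetD r.1 (pvF sel x) false = true := by
    intro x hx1 hx2 hx
    have hfxR := pv_f_inR n sel hlen hsel x hx1 hx2
    rw [hrdec x hx1 hx2] at hx
    rcases Bool.or_eq_true_iff.1 hx with h' | h'
    · exact hmono _ hfxR.1 hfxR.2 (hclo x hx1 hx2 h')
    · have hxmem : x ∈ r.2.1 := by simpa using h'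
      rcases pvChain_f_mem sel r.2.1 r.2.2 hrch x hxmem with h'' | h''
      · exact hvis' _ h'' hfxR
      · rw [h'']
        rcases hcd with h3 | h3
        · exact hmono _ hc1 hc2 h3
        · exact hvis' _ h3 ⟨hc1, hc2⟩
  -- now split on whether current' is in the stack
  show pvInv n sel (pvDfs sel visited team v).1 (pvDfs sel visited team v).2 ∧ _
  have hpvdfs : pvDfs sel visited team v =
      match PySem.List.index? r.2.1 r.2.2 with
      | some k => (r.1, (r.2.1.drop k).foldl (fun t x => PySem.List.pySetD t x true) team)
      | none => (r.1, team) := by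
    rw [pvDfs, hstep]
  rcases hidx : PySem.List.index? r.2.1 r.2.2 with _ | k
  · -- no cycle found: current' was visited before this dfs
    have hnm : r.2.2 ∉ r.2.1 := (PySem.List.index?_eq_none_iff _ _).1 hidx
    have hcurvis : PySem.List.pyGetD visited r.2.2 false = true := by
      rcases hcd with h3 | h3
      · exact h3
      · exact absurd h3 hnm
    have hacyc := pv_no_cycle sel r.2.1 r.2.2
      (fun y => (1 ≤ y ∧ y ≤ n) ∧ PySem.List.pyGetD visited y false = true)
      hrch hrnd
      (by
        rintro y ⟨⟨hy1, hy2⟩, hyv⟩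
        exact ⟨pv_f_inR n sel hlen hsel y hy1 hy2, hclo y hy1 hy2 hyv⟩)
      ⟨⟨hc1, hc2⟩, hcurvis⟩
      (by
        rintro y hy ⟨_, hyv⟩
        rw [(hrst y hy).2] at hyv
        exact absurd hyv (by simp))
    rw [hpvdfs, hidx]
    refine ⟨⟨hrlen, htl, hclo', ?_, ?_⟩, hvis' v hvmem ⟨h1, h2⟩, hmono⟩
    · intro x hx1 hx2 hx
      obtain ⟨hxa, hxb⟩ := hta x hx1 hx2 hx
      exact ⟨hmono x hx1 hx2 hxa, hxb⟩
    · intro x hx1 hx2 hx hxteam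
      rw [hrdec x hx1 hx2] at hx
      rcases Bool.or_eq_true_iff.1 hx with h' | h'
      · exact htb x hx1 hx2 h' hxteam
      · exact hacyc x (by simpa using h')
  · -- cycle found: stack' = pre ++ current' :: suf, mark C := current' :: suf
    obtain ⟨pre, suf, hsplit, hklen, hcpre⟩ := (PySem.List.index?_eq_some_iff r.2.1 r.2.2 k).1 hidx
    set C : List Int := r.2.2 :: suf with hC
    have hdropC : r.2.1.drop k = C := by
      rw [hsplit, ← hklen, List.drop_left]
    have hCsub : ∀ x ∈ C, x ∈ r.2.1 := by
      intro x hx; rw [hsplit]; exact List.mem_append_right _ hx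
    have hCin : ∀ x ∈ C, 1 ≤ x ∧ x ≤ n := fun x hx => (hrst x (hCsub x hx)).1
    have hchC : pvChain sel C r.2.2 := by
      apply pvChain_suffix sel pre C r.2.2
      rw [← hsplit]; exact hrch
    have hndsplit := hrnd
    rw [hsplit, List.nodup_append] at hndsplit
    have hCnd : C.Nodup := hndsplit.2.1
    have hmk := pv_mark_getD n team C htl hCin
    -- every element of the cycle C is cyclic with period C.length ≤ n
    have hLle : C.length ≤ n.toNat := pv_len_le n C hCnd hCin
    have hcycC : ∀ x ∈ C, pvCyc sel n.toNat x := by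
      intro x hx
      obtain ⟨j, hj, hxj⟩ := List.mem_iff_getElem.1 hx
      refine ⟨C.length, by simp [hC], hLle, ?_⟩
      have hfrom := pvChain_iter_from sel C r.2.2 hchC j hj
      have hto := pvChain_iter_to sel C r.2.2 hchC j hj (by simp [hC])
      have hC0 : C[0] = r.2.2 := by simp [hC]
      have : C.length = j + (C.length - j) := by omega
      rw [this, Function.iterate_add_apply, ← hxj, hfrom, ← hC0, hto]
    -- elements of pre lie on no cycle
    have hacycpre : ∀ x ∈ pre, pvAcyc sel x := by
      apply pv_no_cycle sel pre r.2.2 (fun y => y ∈ C)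
      · have := pvChain_prefix sel pre C r.2.2 (by rw [← hsplit]; exact hrch)
        simpa [hC] using this
      · exact hndsplit.1
      · intro y hy
        rcases pvChain_f_mem sel C r.2.2 hchC y hy with h' | h'
        · exact h'
        · rw [h']; simp [hC]
      · simp [hC]
      · intro y hy hyC
        exact hndsplit.2.2 y hy y hyC rfl
    rw [hpvdfs, hidx]
    simp only [hdropC]
    refine ⟨⟨hrlen, by rw [hmk.1, htl], hclo', ?_, ?_⟩, hvis' v hvmem ⟨h1, h2⟩, hmono⟩
    · intro x hx1 hx2 hx
      rw [hmk.2 x hx1 hx2] at hx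
      rcases Bool.or_eq_true_iff.1 hx with h' | h'
      · obtain ⟨hxa, hxb⟩ := hta x hx1 hx2 h'
        exact ⟨hmono x hx1 hx2 hxa, hxb⟩
      · have hxC : x ∈ C := by simpa using h'
        exact ⟨hvis' x (hCsub x hxC) ⟨hx1, hx2⟩, hcycC x hxC⟩
    · intro x hx1 hx2 hx hxteam
      rw [hmk.2 x hx1 hx2] at hxteam
      rcases Bool.or_eq_false_iff.1 hxteam with ⟨hxt, hxC⟩
      have hxnotC : x ∉ C := by simpa using hxC
      rw [hrdec x hx1 hx2] at hx
      rcases Bool.or_eq_true_iff.1 hx with h' | h'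
      · exact htb x hx1 hx2 h' hxt
      · have hxmem : x ∈ r.2.1 := by simpa using h'
        rw [hsplit] at hxmem
        rcases List.mem_append.1 hxmem with h'' | h''
        · exact hacycpre x h''
        · exact absurd h'' hxnotC

lemma pv_outer (n : Int) (sel : List Int) (hn : 0 ≤ n)
    (hlen : n.toNat + 1 ≤ sel.length) (hsel : ∀ x ∈ (sel.take (n.toNat + 1)).drop 1, 1 ≤ x ∧ x ≤ n) :
    ∀ (l : List Int) (visited team : List Bool), (∀ i ∈ l, 1 ≤ i ∧ i ≤ n) →
      pvInv n sel visited team →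
      (fun st : List Bool × List Bool =>
        pvInv n sel st.1 st.2 ∧
        (∀ x : Int, 1 ≤ x → x ≤ n → PySem.List.pyGetD visited x false = true →
          PySem.List.pyGetD st.1 x false = true) ∧
        (∀ i ∈ l, PySem.List.pyGetD st.1 i false = true))
      (l.foldl (fun (st : List Bool × List Bool) i =>
          if PySem.List.pyGetD st.1 i false = false then pvDfs sel st.1 st.2 i else st)
        (visited, team)) := by
  intro l
  induction l with
  | nil =>
    intro visited team hl hInv
    exact ⟨hInv, fun x _ _ hx => hx, by simp⟩
  | cons i is ih =>
    intro visited team hl hInv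
    obtain ⟨hi1, hi2⟩ := hl i (by simp)
    simp only [List.foldl_cons]
    by_cases hfresh : PySem.List.pyGetD visited i false = false
    · rw [if_pos hfresh]
      obtain ⟨hInv', hvi, hmono1⟩ := pv_dfs_spec n sel hn hlen hsel visited team i hInv hi1 hi2 hfresh
      have hstep : (if PySem.List.pyGetD visited i false = false
          then pvDfs sel visited team i else (visited, team)) = pvDfs sel visited team i := by
        rw [if_pos hfresh]
      obtain ⟨c1, c2, c3⟩ := ih (pvDfs sel visited team i).1 (pvDfs sel visited team i).2
        (fun j hj => hl j (by simp [hj])) hInv'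
      refine ⟨by simpa using c1, ?_, ?_⟩
      · intro x hx1 hx2 hx
        exact c2 x hx1 hx2 (hmono1 x hx1 hx2 hx)
      · intro j hj
        rcases List.mem_cons.1 hj with rfl | hj'
        · exact c2 j hi1 hi2 hvi
        · exact c3 j hj'
    · rw [if_neg hfresh]
      have hvi : PySem.List.pyGetD visited i false = true := by
        cases h' : PySem.List.pyGetD visited i false
        · exact absurd h' hfresh
        · rfl
      obtain ⟨c1, c2, c3⟩ := ih visited team (fun j hj => hl j (by simp [hj])) hInv
      refine ⟨c1, c2, ?_⟩
      intro j hj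
      rcases List.mem_cons.1 hj with rfl | hj'
      · exact c2 j hi1 hi2 hvi
      · exact c3 j hj'

theorem pv_main (n : Int) (sel : List Int)
    (hn : 0 ≤ n) (hlen : n.toNat + 1 ≤ sel.length)
    (hsel : ∀ x ∈ (sel.take (n.toNat + 1)).drop 1, 1 ≤ x ∧ x ≤ n) :
    find_teams n sel = find_teams_alt n sel := by
  have hrep : (List.replicate (n + 1).toNat (false : Bool)).length = n.toNat + 1 := by
    simp; omega
  have hrepD : ∀ i : Int, PySem.List.pyGetD (List.replicate (n + 1).toNat (false : Bool)) i false = false :=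
    pv_getD_false_of_all (by intro x hx; exact (List.eq_of_mem_replicate hx))
  have hInv0 : pvInv n sel (List.replicate (n + 1).toNat false) (List.replicate (n + 1).toNat false) := by
    refine ⟨hrep, hrep, ?_, ?_, ?_⟩
    · intro v _ _ hv; rw [hrepD v] at hv; exact absurd hv (by simp)
    · intro v _ _ hv; rw [hrepD v] at hv; exact absurd hv (by simp)
    · intro v _ _ hv; rw [hrepD v] at hv; exact absurd hv (by simp)
  have hran : ∀ i ∈ PySem.List.pyRange 1 (n + 1) 1, 1 ≤ i ∧ i ≤ n := by
    intro i hi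
    have := PySem.List.mem_pyRange_one.1 hi
    omega
  obtain ⟨hInvF, _, hallvis⟩ := pv_outer n sel hn hlen hsel (PySem.List.pyRange 1 (n + 1) 1)
    (List.replicate (n + 1).toNat false) (List.replicate (n + 1).toNat false) hran hInv0
  obtain ⟨_, _, _, hta, htb⟩ := hInvF
  show (PySem.List.pyRange 1 (n + 1) 1).foldl
      (fun r i => if PySem.List.pyGetD
        (((PySem.List.pyRange 1 (n + 1) 1).foldl
          (fun (st : List Bool × List Bool) i =>
            if PySem.List.pyGetD st.1 i false = false then pvDfs sel st.1 st.2 i else st)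
          (List.replicate (n + 1).toNat false, List.replicate (n + 1).toNat false)).2) i false = false
        then r + 1 else r) 0 =
    (PySem.List.pyRange 1 (n + 1) 1).foldl
      (fun r v => if pvChase sel v v n.toNat then r else r + 1) 0
  apply pv_fold_congr
  intro i hi
  obtain ⟨hi1, hi2⟩ := hran i hi
  constructor
  · intro hteamf
    cases hcb : pvChase sel i i n.toNat
    · rfl
    · exfalso
      obtain ⟨k, hk1, hk2, hk3⟩ := (pv_chase_iff sel i n.toNat i).1 hcb
      exact htb i hi1 hi2 (hallvis i hi) hteamf k hk1 hk3
  · intro hcb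
    cases hteam : PySem.List.pyGetD
        (((PySem.List.pyRange 1 (n + 1) 1).foldl
          (fun (st : List Bool × List Bool) i =>
            if PySem.List.pyGetD st.1 i false = false then pvDfs sel st.1 st.2 i else st)
          (List.replicate (n + 1).toNat false, List.replicate (n + 1).toNat false)).2) i false
    · rfl
    · exfalso
      obtain ⟨_, k, hk1, hk2, hk3⟩ := hta i hi1 hi2 hteam
      have : pvChase sel i i n.toNat = true := (pv_chase_iff sel i n.toNat i).2 ⟨k, hk1, hk2, hk3⟩
      rw [this] at hcb
      cases hcb

-- ===== VERDICT (by name: the statement is the Claim_ definition above) =====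
theorem find_teams_spec : Claim_equal_find_teams := by
  intro n sel hdom hpre
  unfold Spec_find_teams
  by_cases hn : n ≤ 0
  · have hnil : PySem.List.pyRange 1 (n + 1) 1 = [] := PySem.List.pyRange_one_eq_nil (by omega)
    show (PySem.List.pyRange 1 (n + 1) 1).foldl _ 0 =
      (PySem.List.pyRange 1 (n + 1) 1).foldl _ 0
    rw [hnil]; rfl
  · rcases hpre with h | ⟨hlen, hsel⟩
    · omega
    · exact pv_main n sel (by omega) hlen hsel
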